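-- pv_equiv track=rewrite | github.com/grzywna-tomasz/tools | settings_creator.py | get_smallest_exclude_path
-- ===== SOURCE A (Python) =====
-- def get_smallest_exclude_path(actual, include_list):
--     if actual.rfind("/") != -1:
--         actual_cut = actual[:actual.rfind("/")]
--         for include_dir in include_list:
--             # Check if directory to be included is a part of include dir
--             if include_dir.find(actual_cut) != -1:
--                 return actual, False
--         smallest_path, status = get_smallest_exclude_path(actual_cut, include_list)
--         return smallest_path, True
--     else:
--         return actual, False
-- ===== SOURCE B (Python) =====
-- def get_smallest_exclude_path(actual, include_list):
--     # Stage 1: collect every slash-truncation of the path up front.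
--     prefixes = [actual[:i] for i, ch in enumerate(actual) if ch == "/"]
--     # Stage 2: walk them from the longest down, tracking whether we trimmed.
--     prev, trimmed = actual, False
--     for cut in reversed(prefixes):
--         if any(cut in d for d in include_list):
--             return prev, trimmed
--         prev, trimmed = cut, True
--     return prev, trimmed
-- ===== Notes on version B (the rewrite author's own statement) =====
-- stated objective: alternative
-- what changed: A re-discovers each cut point with rfind and slicing at every recursion level; B precomputes the whole list of slash-truncations in one enumerate pass and then scans them longest-first with a (prev, trimmed) accumulator, replacing both the recursion and all repeated rfind/slice calls.
import Mathlib
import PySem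

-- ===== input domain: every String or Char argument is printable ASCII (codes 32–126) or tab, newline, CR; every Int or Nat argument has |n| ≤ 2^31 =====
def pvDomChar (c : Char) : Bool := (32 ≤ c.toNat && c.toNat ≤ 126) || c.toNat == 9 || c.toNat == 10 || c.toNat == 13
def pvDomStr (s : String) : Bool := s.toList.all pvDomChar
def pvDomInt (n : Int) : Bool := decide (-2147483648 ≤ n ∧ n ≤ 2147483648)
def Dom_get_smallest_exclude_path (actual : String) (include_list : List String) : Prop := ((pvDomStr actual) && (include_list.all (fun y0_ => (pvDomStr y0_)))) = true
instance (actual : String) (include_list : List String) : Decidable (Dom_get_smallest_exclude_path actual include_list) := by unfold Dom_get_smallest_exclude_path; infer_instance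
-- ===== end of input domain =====

-- B precomputes all slash-truncations in one pass, then scans them longest-first (no rfind/slicing in the loop); objective: simpler staged decomposition, same cost.

-- ===== PORT A =====
-- A: recursion on the path (rfind/slice at each level); fuel = length+1 bounds the depth (each cut is strictly shorter). Worked on .toList, each step via the exact PySem.Chars primitives.
def pvGeAuxL (fuel : Nat) (l : List Char) (incl : List (List Char)) : List Char × Bool :=
  match fuel with
  | 0 => (l, false)
  | fuel + 1 =>
    if PySem.Chars.rfind l ['/'] ≠ -1 then
      let cut := PySem.Chars.slice l none (some (PySem.Chars.rfind l ['/']))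
      if incl.any (fun include_dir => PySem.Chars.find include_dir cut ≠ -1) then
        (l, false)
      else
        ((pvGeAuxL fuel cut incl).1, true)
    else (l, false)

def get_smallest_exclude_path (actual : String) (include_list : List String) : String × Bool :=
  let r := pvGeAuxL (actual.toList.length + 1) actual.toList (include_list.map (·.toList))
  (String.mk r.1, r.2)

-- ===== PORT B =====
-- B stage 1: the comprehension [actual[:i] for i, ch in enumerate(actual) if ch == "/"]
def pvPrefixesL (l : List Char) : List (List Char) :=
  (PySem.List.enumerate l 0).filterMap
    (fun p => if p.2 = '/' then some (PySem.List.slice l none (some p.1)) else none)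

-- B stage 2: the for-loop over reversed(prefixes) carrying (prev, trimmed)
def pvScanL (incl : List (List Char)) (prev : List Char) (trimmed : Bool) : List (List Char) → List Char × Bool
  | [] => (prev, trimmed)
  | cut :: rest =>
    if incl.any (fun d => PySem.Chars.isIn cut d) then (prev, trimmed)
    else pvScanL incl cut true rest

def get_smallest_exclude_path_alt (actual : String) (include_list : List String) : String × Bool :=
  let r := pvScanL (include_list.map (·.toList)) actual.toList false (pvPrefixesL actual.toList).reverse
  (String.mk r.1, r.2)

-- ===== PRECONDITION & SPEC =====
def Spec_get_smallest_exclude_path (actual : String) (include_list : List String) (out : String × Bool) : Prop := out = get_smallest_exclude_path_alt actual include_list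
instance (actual : String) (include_list : List String) (out : String × Bool) : Decidable (Spec_get_smallest_exclude_path actual include_list out) := by unfold Spec_get_smallest_exclude_path; infer_instance

-- ===== CLAIM (what is proved, stated in full; the proofs are below) =====
def Claim_equal_get_smallest_exclude_path : Prop := ∀ (actual : String) (include_list : List String), Dom_get_smallest_exclude_path actual include_list → Spec_get_smallest_exclude_path actual include_list (get_smallest_exclude_path actual include_list)

-- ===== LEMMAS AND PROOFS =====

-- [c] is a prefix of s iff s starts with c
theorem pvSinglePrefix (c : Char) (s : List Char) : [c].isPrefixOf s = true ↔ s[0]? = some c := by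
  cases s with
  | nil => simp [List.isPrefixOf]
  | cons a t =>
    simp [List.isPrefixOf]
    exact eq_comm

-- rfind.go for a single-character needle: either no hit at positions ≤ j, or the highest hit k ≤ j
theorem pvGoSpec (s : List Char) (c : Char) (j : Nat) :
    (PySem.Chars.rfind.go s [c] j = -1 ∧ ∀ i : Nat, i ≤ j → s[i]? ≠ some c) ∨
    (∃ k : Nat, k ≤ j ∧ PySem.Chars.rfind.go s [c] j = (k : Int) ∧ s[k]? = some c ∧
      ∀ i : Nat, k < i → i ≤ j → s[i]? ≠ some c) := by
  induction j with
  | zero =>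
    by_cases h : [c].isPrefixOf s = true
    · right; exact ⟨0, le_rfl, by simp [PySem.Chars.rfind.go, h], (pvSinglePrefix c s).mp h,
        fun i hi hi0 => absurd (Nat.le_zero.mp hi0 ▸ hi) (by omega)⟩
    · left
      refine ⟨by simp [PySem.Chars.rfind.go, h], fun i hi => ?_⟩
      interval_cases i
      exact fun hs => h ((pvSinglePrefix c s).mpr hs)
  | succ j ih =>
    have hcond : [c].isPrefixOf (s.drop (j + 1)) = true ↔ s[j+1]? = some c := by
      rw [pvSinglePrefix]; simp
    by_cases h : [c].isPrefixOf (s.drop (j + 1)) = true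
    · right
      exact ⟨j + 1, le_rfl, by simp [PySem.Chars.rfind.go, h], hcond.mp h,
        fun i hlt hle => absurd hle (by omega)⟩
    · have hne : s[j+1]? ≠ some c := fun hs => h (hcond.mpr hs)
      rcases ih with ⟨h1, h2⟩ | ⟨k, hk, hgo, hsk, hmax⟩
      · left
        refine ⟨by simp [PySem.Chars.rfind.go, h, h1], fun i hi => ?_⟩
        rcases Nat.lt_or_ge i (j + 1) with hlt | hge
        · exact h2 i (by omega)
        · have : i = j + 1 := by omega
          exact this ▸ hne
      · right
        refine ⟨k, by omega, by simp [PySem.Chars.rfind.go, h, hgo], hsk, fun i hlt hle => ?_⟩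
        rcases Nat.lt_or_ge i (j + 1) with hl | hg
        · exact hmax i hlt (by omega)
        · have : i = j + 1 := by omega
          exact this ▸ hne

-- rfind on a single character: either absent, or the LAST index
theorem pvRfindCases (l : List Char) (c : Char) :
    (PySem.Chars.rfind l [c] = -1 ∧ c ∉ l) ∨
    (∃ k : Nat, k < l.length ∧ PySem.Chars.rfind l [c] = (k : Int) ∧ l[k]? = some c ∧
      c ∉ l.drop (k + 1)) := by
  rcases pvGoSpec l c l.length with ⟨h1, h2⟩ | ⟨k, hk, hgo, hsk, hmax⟩
  · left
    refine ⟨h1, fun hmem => ?_⟩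
    rcases List.getElem_of_mem hmem with ⟨i, hi, hli⟩
    exact h2 i (by omega) (by simp [List.getElem?_eq_getElem hi, hli])
  · right
    have hklen : k < l.length := by
      rcases Nat.lt_or_ge k l.length with h | h
      · exact h
      · exact absurd hsk (by simp [List.getElem?_eq_none (by omega : l.length ≤ k)])
    refine ⟨k, hklen, hgo, hsk, fun hmem => ?_⟩
    rcases List.getElem_of_mem hmem with ⟨i, hi, hli⟩
    have hlen : k + 1 + i < l.length := by simp [List.length_drop] at hi; omega
    have hval : l[k + 1 + i]? = some c := by
      rw [← List.getElem?_drop]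
      simp [List.getElem?_eq_getElem hi, hli]
    exact hmax (k + 1 + i) (by omega) (by omega) hval

-- no slash in t ⇒ the comprehension stage contributes nothing from t
theorem pvPrefNone (a : List Char) (t : List Char) (s : Int) (h : '/' ∉ t) :
    (PySem.List.enumerate t s).filterMap
      (fun p => if p.2 = '/' then some (PySem.List.slice a none (some p.1)) else none) = [] := by
  induction t generalizing s with
  | nil => simp [PySem.List.enumerate_nil]
  | cons x xs ih =>
    have hx : x ≠ '/' := fun hh => h (hh ▸ List.mem_cons_self)
    simp [PySem.List.enumerate_cons, hx, ih (s + 1) (fun hm => h (List.mem_cons_of_mem _ hm))]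

-- structure of the prefix list at the LAST slash: P (l1 ++ '/'::t) = P l1 ++ [l1] when '/' ∉ t
theorem pvPrefSplit (l1 t : List Char) (h : '/' ∉ t) :
    pvPrefixesL (l1 ++ '/' :: t) = pvPrefixesL l1 ++ [l1] := by
  unfold pvPrefixesL
  rw [PySem.List.enumerate_append, List.filterMap_append]
  congr 1
  · apply List.filterMap_congr
    intro p hp
    rcases (PySem.List.mem_enumerate_iff _ _ _).mp hp with ⟨k, hk, rfl⟩
    simp only [zero_add]
    by_cases hc : l1[k] = '/' <;>
      simp [hc, PySem.List.slice_to_natCast, List.take_append_of_le_length (le_of_lt hk)]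
  · rw [PySem.List.enumerate_cons, List.filterMap_cons]
    rw [pvPrefNone _ t _ h]
    simp [PySem.List.slice_to_natCast, List.take_left']

-- no slash at all ⇒ no prefixes
theorem pvPrefNil (l : List Char) (h : '/' ∉ l) : pvPrefixesL l = [] := by
  unfold pvPrefixesL
  exact pvPrefNone l l 0 h

-- the trimmed flag, once true, only forces the second component to true
theorem pvScanFst (incl : List (List Char)) (rest : List (List Char)) (prev : List Char) (b b' : Bool) :
    (pvScanL incl prev b rest).1 = (pvScanL incl prev b' rest).1 := by
  induction rest generalizing prev b b' with
  | nil => rfl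
  | cons cut rs ih =>
    simp only [pvScanL]
    split_ifs with hm
    · rfl
    · exact ih cut true true

theorem pvScanSnd (incl : List (List Char)) (rest : List (List Char)) (prev : List Char) :
    (pvScanL incl prev true rest).2 = true := by
  induction rest generalizing prev with
  | nil => rfl
  | cons cut rs ih =>
    simp only [pvScanL]
    split_ifs with hm
    · rfl
    · exact ih cut

theorem pvScanTrue (incl : List (List Char)) (rest : List (List Char)) (prev : List Char) :
    pvScanL incl prev true rest = ((pvScanL incl prev false rest).1, true) := by
  refine Prod.ext ?_ ?_
  · exact pvScanFst incl rest prev true false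
  · exact pvScanSnd incl rest prev

-- A's inner membership test equals B's:  d.find(cut) != -1  ⟺  cut in d
theorem pvTestEq (cut : List Char) (incl : List (List Char)) :
    (incl.any (fun include_dir => decide (PySem.Chars.find include_dir cut ≠ -1))) =
    (incl.any (fun d => PySem.Chars.isIn cut d)) := by
  induction incl with
  | nil => rfl
  | cons d ds ih =>
    simp only [List.any_cons, ih]
    congr 1
    by_cases h : cut <:+: d
    · have h1 : PySem.Chars.find d cut ≠ -1 := (PySem.Chars.find_ne_neg_one_iff d cut).mpr h
      have h2 : PySem.Chars.isIn cut d = true := (PySem.Chars.isIn_iff_infix cut d).mpr h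
      simp [h1, h2]
    · have h1 := (PySem.Chars.find_eq_neg_one_iff d cut).mpr h
      have h2 : PySem.Chars.isIn cut d = false := (PySem.Chars.isIn_eq_false_iff cut d).mpr h
      simp [h1, h2]

-- main list-level equivalence
theorem pvMain (fuel : Nat) (l : List Char) (incl : List (List Char)) (hf : l.length < fuel) :
    pvGeAuxL fuel l incl = pvScanL incl l false (pvPrefixesL l).reverse := by
  induction fuel generalizing l with
  | zero => omega
  | succ fuel ih =>
    rcases pvRfindCases l '/' with ⟨hr, hnot⟩ | ⟨k, hk, hr, hsk, hnot⟩
    · rw [pvPrefNil l hnot]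
      simp [pvGeAuxL, pvScanL, hr]
    · have hsplit : l = l.take k ++ '/' :: l.drop (k + 1) := by
        conv_lhs => rw [← List.take_append_drop k l]
        congr 1
        rw [List.drop_eq_getElem_cons hk]
        simp_all
      have hcut : PySem.Chars.slice l none (some ((k : Nat) : Int)) = l.take k := by
        simp [PySem.List.slice_to_natCast]
      have hpref : (pvPrefixesL l).reverse = l.take k :: (pvPrefixesL (l.take k)).reverse := by
        conv_lhs => rw [hsplit, pvPrefSplit _ _ hnot]
        simp
      simp only [pvGeAuxL, hr, hcut, hpref]
      have hne : ((k : Int) ≠ -1) := by omega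
      rw [if_pos hne]
      rw [pvScanL, ← pvTestEq]
      split_ifs with hm
      · rfl
      · rw [pvScanTrue, ih (l.take k) (by simp; omega)]

-- ===== VERDICT (by name: the statement is the Claim_ definition above) =====
theorem get_smallest_exclude_path_spec : Claim_equal_get_smallest_exclude_path := by
  intro actual include_list _
  unfold Spec_get_smallest_exclude_path get_smallest_exclude_path get_smallest_exclude_path_alt
  rw [pvMain _ _ _ (by omega)]
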